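-- pv_equiv track=rewrite | github.com/sincerity1129/codetest | day12/challenge.py | solution
-- ===== SOURCE A (Python) =====
-- def solution(n, k, enemy):
--     '''
--     n = 병사의 수
--     enemy = 적의 수
--     k = 라운드 패쓰권 개수
--
--     n=7, k=3, enemy=[4, 2, 4, 5, 3, 3, 1]
--     1,3,5 -> 패쓰권 사용, 2,4 -> 2,5 병사 소모
--     5라운드까지 가능
--
--     풀이과정
--     완전탐색인가? 경우의 수마다 다 적용해서 최적의 값을 찾는 것 같음
--     며칠 전에 했던 던전 최대치 같은 느낌
--     재귀함수를 써서 모든 경우의 수 모두 확인해서 최고 값 찾아 내기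
--
--     결론은 실패
--     완전 탐색 아니고 힙을 쓰는 방식이었음..
--
--     다른 방식 풀이
--     정렬해서 가장 큰 값을 빼주는 방식으로 진행
--     리스트 값 담아주고 큰 값 뺄 때 K 값 -1
--     '''
--     mob_list = []
--     mob_count, answer = 0, 0
--     for mob in enemy:
--         mob_list.append(mob)
--         mob_count += mob
--         if mob_count > n:
--             if k ==0: break
--             k -= 1
--             mob_count = sum(mob_list) - mob_list.pop(mob_list.index(max(mob_list)))
--         answer += 1
--
--     return answer
-- ===== SOURCE B (Python) =====
-- def solution(n, k, enemy):
--     # Alternative strategy: keep surviving enemy groups in a descending-sorted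
--     # list (binary-search insertion) with a running total, so the largest group
--     # is always at the front: no max()/index()/sum() rescans at each pass use.
--     remaining = []  # sorted in non-increasing order
--     total = 0
--     rounds = 0
--     for mob in enemy:
--         lo, hi = 0, len(remaining)
--         while lo < hi:
--             mid = (lo + hi) // 2
--             if remaining[mid] >= mob:
--                 lo = mid + 1
--             else:
--                 hi = mid
--         remaining.insert(lo, mob)
--         total += mob
--         if total > n:
--             if k == 0:
--                 break
--             k -= 1
--             total -= remaining.pop(0)
--         rounds += 1
--     return rounds
-- ===== Notes on version B (the rewrite author's own statement) =====
-- stated objective: alternative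
-- what changed: B maintains the surviving groups as a descending-sorted list with a running total, so each pass use pops the head in O(1) instead of A's sum()+max()+index()+pop() rescans of the whole list.
import Mathlib
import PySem

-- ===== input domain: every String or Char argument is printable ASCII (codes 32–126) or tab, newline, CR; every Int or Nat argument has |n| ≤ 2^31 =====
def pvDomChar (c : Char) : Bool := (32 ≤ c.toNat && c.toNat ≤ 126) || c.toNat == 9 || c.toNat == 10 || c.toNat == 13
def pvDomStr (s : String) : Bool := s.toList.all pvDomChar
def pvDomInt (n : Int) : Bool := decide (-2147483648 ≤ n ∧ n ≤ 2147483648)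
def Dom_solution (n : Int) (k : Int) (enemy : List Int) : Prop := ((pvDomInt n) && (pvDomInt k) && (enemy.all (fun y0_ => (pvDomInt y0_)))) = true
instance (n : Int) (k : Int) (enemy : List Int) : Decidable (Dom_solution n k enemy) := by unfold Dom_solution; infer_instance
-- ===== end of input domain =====

-- B keeps the surviving groups in a descending-sorted list (binary-search insertion, running total; a pass use pops the head) instead of A's max/index/sum rescans; objective: alternative.

-- ===== PORT A =====
-- loop state: mob_list, mob_count, k, answer; 'break' returns answer directly
def solutionLoop (n : Int) : List Int → List Int → Int → Int → Int → Int
  | [], _, _, _, answer => answer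
  | mob :: rest, mobList0, mobCount0, k, answer =>
    let mobList := mobList0 ++ [mob]            -- mob_list.append(mob)
    let mobCount := mobCount0 + mob             -- mob_count += mob
    if mobCount > n then
      if k == 0 then answer                     -- break
      else
        match PySem.List.max? mobList (fun x => x) with
        | none => answer                        -- unreachable: mobList nonempty
        | some m =>
          match PySem.List.index? mobList m with
          | none => answer                      -- unreachable: m ∈ mobList
          | some i =>
            match PySem.List.pop? mobList (i : Int) with
            | none => answer                    -- unreachable: i in range
            | some (popped, rest') =>
              -- mob_count = sum(mob_list) - mob_list.pop(...)  (sum taken before the pop)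
              solutionLoop n rest rest' (mobList.sum - popped) (k - 1) (answer + 1)
    else
      solutionLoop n rest mobList mobCount k (answer + 1)

def solution (n : Int) (k : Int) (enemy : List Int) : Int :=
  solutionLoop n enemy [] 0 k 0

-- ===== PORT B =====
-- the 'while lo < hi' binary search; r[mid] is always in range (lo ≤ mid < hi ≤ len r);
-- fuel bounds the iteration count (hi - lo ≤ fuel at every call, so 0-fuel is unreachable)
def bisectDesc (r : List Int) (mob : Int) : Nat → Nat → Nat → Nat
  | 0, lo, _ => lo
  | fuel + 1, lo, hi =>
    if lo < hi then
      let mid := (lo + hi) / 2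
      if r.getD mid 0 ≥ mob then bisectDesc r mob fuel (mid + 1) hi
      else bisectDesc r mob fuel lo mid
    else lo

def solutionAltLoop (n : Int) : List Int → List Int → Int → Int → Int → Int
  | [], _, _, _, rounds => rounds
  | mob :: rest, remaining0, total0, k, rounds =>
    let lo := bisectDesc remaining0 mob remaining0.length 0 remaining0.length
    let remaining := PySem.List.insert remaining0 (lo : Int) mob   -- remaining.insert(lo, mob)
    let total := total0 + mob
    if total > n then
      if k == 0 then rounds                     -- break
      else
        match remaining with
        | [] => rounds                          -- unreachable: remaining nonempty
        | h :: t => solutionAltLoop n rest t (total - h) (k - 1) (rounds + 1)   -- total -= remaining.pop(0)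
    else
      solutionAltLoop n rest remaining total k (rounds + 1)

def solution_alt (n : Int) (k : Int) (enemy : List Int) : Int :=
  solutionAltLoop n enemy [] 0 k 0

-- ===== PRECONDITION & SPEC =====
def Spec_solution (n : Int) (k : Int) (enemy : List Int) (out : Int) : Prop := out = solution_alt n k enemy
instance (n : Int) (k : Int) (enemy : List Int) (out : Int) : Decidable (Spec_solution n k enemy out) := by unfold Spec_solution; infer_instance

-- ===== CLAIM (what is proved, stated in full; the proofs are below) =====
def Claim_equal_solution : Prop := ∀ (n : Int) (k : Int) (enemy : List Int), Dom_solution n k enemy → Spec_solution n k enemy (solution n k enemy)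

-- ===== LEMMAS AND PROOFS =====

-- descending list: earlier entries are ≥ later ones
lemma sorted_getD_mono (r : List Int) (hsort : r.Pairwise (· ≥ ·)) (p q : Nat)
    (hpq : p ≤ q) (hq : q < r.length) : r.getD q 0 ≤ r.getD p 0 := by
  rcases Nat.eq_or_lt_of_le hpq with rfl | hlt
  · exact le_refl _
  · rw [List.getD_eq_getElem r 0 hq, List.getD_eq_getElem r 0 (lt_trans hlt hq)]
    exact List.pairwise_iff_getElem.mp hsort p q (lt_trans hlt hq) hq hlt

lemma bisectDesc_spec (r : List Int) (mob : Int) (hsort : r.Pairwise (· ≥ ·)) :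
    ∀ (fuel lo hi : Nat), hi - lo ≤ fuel → lo ≤ hi → hi ≤ r.length →
      (∀ j, j < lo → mob ≤ r.getD j 0) → (∀ j, hi ≤ j → j < r.length → r.getD j 0 < mob) →
      (bisectDesc r mob fuel lo hi ≤ r.length ∧
       (∀ j, j < bisectDesc r mob fuel lo hi → mob ≤ r.getD j 0) ∧
       (∀ j, bisectDesc r mob fuel lo hi ≤ j → j < r.length → r.getD j 0 < mob)) := by
  intro fuel
  induction fuel with
  | zero =>
    intro lo hi hfl hlohi hhil hlow hhigh
    unfold bisectDesc
    refine ⟨by omega, hlow, ?_⟩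
    intro j hj hjlen
    exact hhigh j (by omega) hjlen
  | succ fuel ih =>
    intro lo hi hfl hlohi hhil hlow hhigh
    unfold bisectDesc
    split
    · rename_i hlt
      simp only [ge_iff_le]
      split
      · rename_i hge
        refine ih _ _ (by omega) (by omega) hhil ?_ hhigh
        intro j hj
        by_cases hjlo : j < lo
        · exact hlow j hjlo
        · calc mob ≤ r.getD ((lo + hi) / 2) 0 := hge
            _ ≤ r.getD j 0 := sorted_getD_mono r hsort j _ (by omega) (by omega)
      · rename_i hngce
        refine ih _ _ (by omega) (by omega) (by omega) hlow ?_
        intro j hj hjlen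
        calc r.getD j 0 ≤ r.getD ((lo + hi) / 2) 0 := sorted_getD_mono r hsort _ j hj hjlen
          _ < mob := by omega
    · rename_i hnlt
      refine ⟨by omega, hlow, ?_⟩
      intro j hj hjlen
      exact hhigh j (by omega) hjlen

lemma insert_sorted (r : List Int) (mob : Int) (i : Nat) (hil : i ≤ r.length)
    (hbefore : ∀ j, j < i → mob ≤ r.getD j 0)
    (hafter : ∀ j, i ≤ j → j < r.length → r.getD j 0 < mob)
    (hsort : r.Pairwise (· ≥ ·)) :
    (r.take i ++ mob :: r.drop i).Pairwise (· ≥ ·) := by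
  refine List.pairwise_append.mpr ⟨hsort.sublist (List.take_sublist _ _), ?_, ?_⟩
  · refine List.pairwise_cons.mpr ⟨?_, hsort.sublist (List.drop_sublist _ _)⟩
    intro y hy
    obtain ⟨m, hm, rfl⟩ := List.mem_iff_getElem.mp hy
    rw [List.getElem_drop]
    have hlen : i + m < r.length := by
      have := r.length_drop (i := i); omega
    have := hafter (i + m) (by omega) hlen
    rw [List.getD_eq_getElem r 0 hlen] at this
    omega
  · intro x hx y hy
    obtain ⟨m, hm, rfl⟩ := List.mem_iff_getElem.mp hx
    have hmi : m < i := by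
      have := r.length_take (i := i); omega
    have hmlen : m < r.length := by omega
    rw [List.getElem_take]
    have hxm : mob ≤ r[m] := by
      have := hbefore m hmi
      rwa [List.getD_eq_getElem r 0 hmlen] at this
    rcases List.mem_cons.mp hy with rfl | hy'
    · exact hxm
    · obtain ⟨p, hp, rfl⟩ := List.mem_iff_getElem.mp hy'
      rw [List.getElem_drop]
      have hplen : i + p < r.length := by
        have := r.length_drop (i := i); omega
      have := hafter (i + p) (by omega) hplen
      rw [List.getD_eq_getElem r 0 hplen] at this
      omega

-- pop(index(v)) removes the first occurrence of v, i.e. List.erase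
lemma pop_index_eq_erase (l : List Int) (v : Int) (h : v ∈ l) :
    ∃ i : Nat, PySem.List.index? l v = some i ∧
      PySem.List.pop? l (i : Int) = some (v, l.erase v) := by
  induction l with
  | nil => cases h
  | cons x t ih =>
    by_cases hx : x = v
    · subst hx
      exact ⟨0, PySem.List.index?_cons_self x t, by simp [PySem.List.pop?_zero_cons]⟩
    · have hvt : v ∈ t := by
        rcases List.mem_cons.mp h with rfl | h'
        · exact absurd rfl hx
        · exact h'
      rcases ih hvt with ⟨i, hi, hp⟩
      obtain ⟨pre, suf, heq, hlenp, -⟩ := (PySem.List.index?_eq_some_iff t v i).mp hi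
      have hlen : i < t.length := by
        rw [heq, List.length_append, List.length_cons]; omega
      rw [PySem.List.pop?_natCast t i hlen] at hp
      have hget : t[i] = v := (Prod.mk.injEq _ _ _ _ ▸ Option.some.inj hp).1
      have herase : t.eraseIdx i = t.erase v := (Prod.mk.injEq _ _ _ _ ▸ Option.some.inj hp).2
      refine ⟨i + 1, ?_, ?_⟩
      · rw [PySem.List.index?_cons_of_ne t hx, hi]; rfl
      · rw [PySem.List.pop?_natCast (x :: t) (i + 1) (by simpa using Nat.succ_lt_succ hlen)]
        simp [List.eraseIdx_cons_succ, hget, herase, hx]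

lemma max_head_of_sorted (m h : Int) (mobList : List Int) (t : List Int)
    (hperm : mobList.Perm (h :: t)) (hsort : (h :: t).Pairwise (· ≥ ·))
    (hmax : PySem.List.max? mobList (fun x => x) = some m) : m = h := by
  have hm_mem : m ∈ mobList := PySem.List.max?_mem hmax
  have hm_le : m ≤ h := by
    rcases List.mem_cons.mp (hperm.mem_iff.mp hm_mem) with rfl | hmem
    · exact le_refl _
    · exact (List.pairwise_cons.mp hsort).1 m hmem
  have hh_le : h ≤ m := PySem.List.max?_isMax hmax h (hperm.mem_iff.mpr (by simp))
  omega

lemma loop_eq (n : Int) :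
    ∀ (rest mobList remaining : List Int) (c k ans : Int),
      mobList.Perm remaining → remaining.Pairwise (· ≥ ·) → c = mobList.sum →
      solutionLoop n rest mobList c k ans = solutionAltLoop n rest remaining c k ans := by
  intro rest
  induction rest with
  | nil => intro _ _ _ _ _ _ _ _; rfl
  | cons mob rest ih =>
    intro mobList remaining c k ans hperm hsort hc
    simp only [solutionLoop, solutionAltLoop]
    obtain ⟨hil, hbefore, hafter⟩ :=
      bisectDesc_spec remaining mob hsort remaining.length 0 remaining.length (by omega)
        (by omega) (le_refl _) (by omega) (by omega)
    have hE : PySem.List.insert remaining ((bisectDesc remaining mob remaining.length 0 remaining.length : Nat) : Int) mob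
        = remaining.take (bisectDesc remaining mob remaining.length 0 remaining.length)
          ++ mob :: remaining.drop (bisectDesc remaining mob remaining.length 0 remaining.length) :=
      PySem.List.insert_natCast remaining _ mob hil
    rw [hE]
    have hsort' : (remaining.take (bisectDesc remaining mob remaining.length 0 remaining.length)
        ++ mob :: remaining.drop (bisectDesc remaining mob remaining.length 0 remaining.length)).Pairwise (· ≥ ·) :=
      insert_sorted remaining mob _ hil hbefore hafter hsort
    have hpermI : (remaining.take (bisectDesc remaining mob remaining.length 0 remaining.length)
        ++ mob :: remaining.drop (bisectDesc remaining mob remaining.length 0 remaining.length)).Perm (mob :: remaining) := by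
      refine List.perm_middle.trans ?_
      rw [List.take_append_drop]
    have hperm' : (mobList ++ [mob]).Perm (remaining.take (bisectDesc remaining mob remaining.length 0 remaining.length)
        ++ mob :: remaining.drop (bisectDesc remaining mob remaining.length 0 remaining.length)) :=
      (List.perm_append_singleton mob mobList).trans ((hperm.cons mob).trans hpermI.symm)
    by_cases hov : c + mob > n
    · simp only [if_pos hov]
      by_cases hk : k = 0
      · simp [hk]
      · simp only [beq_iff_eq, hk, if_false]
        obtain ⟨m, hm⟩ : ∃ m, PySem.List.max? (mobList ++ [mob]) (fun x => x) = some m := by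
          cases hmx : PySem.List.max? (mobList ++ [mob]) (fun x => x) with
          | none => rw [PySem.List.max?_eq_none_iff] at hmx; simp at hmx
          | some m => exact ⟨m, rfl⟩
        cases hins : remaining.take (bisectDesc remaining mob remaining.length 0 remaining.length)
            ++ mob :: remaining.drop (bisectDesc remaining mob remaining.length 0 remaining.length) with
        | nil => exact absurd hins (by simp)
        | cons h t =>
          rw [hins] at hperm' hsort'
          have hmh : m = h := max_head_of_sorted m h _ t hperm' hsort' hm
          have hmem : m ∈ mobList ++ [mob] := PySem.List.max?_mem hm
          obtain ⟨i, hi, hp⟩ := pop_index_eq_erase (mobList ++ [mob]) m hmem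
          simp only [hm, hi, hp]
          have hpermE : ((mobList ++ [mob]).erase m).Perm t := by
            rw [hmh]
            have h2 := hperm'.erase h
            rwa [List.erase_cons_head] at h2
          have hsum : ((mobList ++ [mob]).erase m).sum = (mobList ++ [mob]).sum - m := by
            have := List.sum_erase hmem
            omega
          have hrec := ih ((mobList ++ [mob]).erase m) t ((mobList ++ [mob]).sum - m) (k - 1) (ans + 1)
            hpermE (List.Pairwise.of_cons hsort') hsum.symm
          rw [hrec, hmh]
          have hcs : (mobList ++ [mob]).sum = c + mob := by
            rw [List.sum_append, hc]; simp
          rw [hcs]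
    · simp only [if_neg hov]
      exact ih (mobList ++ [mob]) _ (c + mob) k (ans + 1) hperm' hsort'
        (by rw [List.sum_append, hc]; simp)

-- ===== VERDICT (by name: the statement is the Claim_ definition above) =====
theorem solution_spec : Claim_equal_solution := by
  intro n k enemy _
  unfold Spec_solution solution solution_alt
  exact loop_eq n enemy [] [] 0 k 0 (List.Perm.refl _) (by simp) rfl
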